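-- pv_equiv track=rewrite | github.com/Korch195/Kontora | imdb/original_code.py | find_films_with_keywords
-- ===== SOURCE A (Python) =====
-- def find_film_keywords(film_keywords: dict, film_name: str) -> set:
--     '''
--     This function should return the set of all keywords\
--      used in the movie film_name. Here, film_keywords is\
--      a dictionary obtained with input_from_file, where key\
--      is the name of the keyword and value is a list of movie\
--      names where this keyword is used. If no such movie_name is\
--      found, it should return an empty set.
--
--     >>> find_film_keywords({"cars": ["Ford", "The lift","Darwash", "Mustang", "Dodge"],\
-- 'animal':["American cat","Mouse trap","Dodge"], "kitchen": ["The Lift", "Dodge", "Darwash"]\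
-- , "life": ['The Sun', 'Dodge']}, "Dodge") == {'cars', 'kitchen', 'life', 'animal'}
--     True
--     '''
--     if not isinstance(film_keywords, dict) and not isinstance(film_name, str):
--         return 'Wrong input'
--     keys_values = set()
--     for keyword, values in film_keywords.items():
--         for value in values:
--             if value == film_name:
--                 keys_values.add(keyword)
--     return keys_values
--
-- def find_films_with_keywords(film_keywords: dict, num_of_films: int):
--     '''
--     This function should return a list of movies that have the largest number of keywords. \
--     The size of the list is determined by num_of_films\
--     (i.e., if num_of_films = 0, then return an empty\
--     list, if num_of_films = 3, then return a list of three elements).\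
--     The function returns a list of tuples, where each tuple is of the \
--     form (film_name, number_of_keywords), that is, the name of the movie\
--     and the number of keywords, respectively. This list is sorted by the\
--     number of keywords, starting with the movie with the largest number. If the number is the same,\
--     the movies are displayed in lexicographic order.
--
--     >>> find_films_with_keywords({"cars":["Ford", "The lift", "Darwash", "Mustang", "Dodge"],\
-- "animal": ["American cat", "Mouse trap", "Dodge"], "kitchen":\
--  ["The Lift", "Dodge", "Darwash"], "life": ['The Sun', 'Dodge']}, 9)
--     [('Dodge', 4), ('Darwash', 2), ('American cat', 1), ('Ford', 1), \
-- ('Mouse trap', 1), ('Mustang', 1), ('The Lift', 1), ('The Sun', 1), ('The lift', 1)]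
--     '''
--     if not isinstance(film_keywords, dict) and not isinstance(num_of_films, int):
--         return 'Wrong input'
--
--     ganre_list = []
--     forbidden_list = []
--
--     for values in film_keywords.values():
--         for value in values:
--             if value not in forbidden_list:
--                 ganre_num = len(find_film_keywords(film_keywords, value))
--                 ganre_list.append(ganre_num)
--                 forbidden_list.append(value)
--
--     zipped_tuple = list(zip(forbidden_list, ganre_list))
--     films = sorted(zipped_tuple, key = lambda x: (-x[1], x[0]))
--     return films[:num_of_films]
-- ===== SOURCE B (Python) =====
-- def find_films_with_keywords(film_keywords: dict, num_of_films: int):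
--     kw_sets = {}
--     for keyword, films in film_keywords.items():
--         for film in films:
--             kw_sets.setdefault(film, set()).add(keyword)
--     ranked = sorted(((film, len(s)) for film, s in kw_sets.items()),
--                     key=lambda x: (-x[1], x[0]))
--     return ranked[:num_of_films]
-- ===== Notes on version B (the rewrite author's own statement) =====
-- stated objective: faster
-- what changed: B makes one pass over the keyword lists building a film->keyword-set dict and then sorts, instead of A's per-film full rescan of the whole dict (find_film_keywords) for every newly seen film.
import Mathlib
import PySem

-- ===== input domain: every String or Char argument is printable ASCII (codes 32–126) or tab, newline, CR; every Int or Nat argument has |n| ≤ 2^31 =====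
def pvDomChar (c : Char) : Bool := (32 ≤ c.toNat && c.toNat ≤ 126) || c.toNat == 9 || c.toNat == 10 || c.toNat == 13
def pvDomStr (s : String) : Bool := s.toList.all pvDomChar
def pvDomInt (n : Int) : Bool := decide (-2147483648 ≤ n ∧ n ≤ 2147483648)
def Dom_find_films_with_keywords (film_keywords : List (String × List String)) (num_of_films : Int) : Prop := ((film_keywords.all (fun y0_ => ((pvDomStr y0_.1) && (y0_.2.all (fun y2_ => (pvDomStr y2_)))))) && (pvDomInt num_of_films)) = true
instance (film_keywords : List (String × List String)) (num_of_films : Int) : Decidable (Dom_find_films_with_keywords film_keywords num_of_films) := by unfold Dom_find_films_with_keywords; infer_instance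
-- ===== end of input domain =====

-- B replaces A's per-film rescan of the whole dict with one pass building a film → keyword-set
-- dict, then sorts; objective: faster (asymptotic). The isinstance guards of A never fire on
-- typed input and are not ported.

-- ===== PORT A =====
def find_film_keywords (film_keywords : List (String × List String)) (film_name : String) : PySem.Set String :=
  film_keywords.foldl
    (fun keys_values kv =>
      kv.2.foldl
        (fun keys_values value =>
          if value = film_name then PySem.Set.add keys_values kv.1 else keys_values)
        keys_values)
    PySem.Set.empty

def find_films_with_keywords (film_keywords : List (String × List String)) (num_of_films : Int) : List (String × Int) :=
  let st := film_keywords.foldl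
    (fun (st : List Int × List String) kv =>
      kv.2.foldl
        (fun (st : List Int × List String) value =>
          if value ∈ st.2 then st
          else (st.1 ++ [PySem.Set.len (find_film_keywords film_keywords value)],
                st.2 ++ [value]))
        st)
    ([], [])
  let zipped_tuple := st.2.zip st.1
  let films := PySem.List.sorted2 zipped_tuple (fun x => -x.2) (fun x => x.1)
  PySem.List.slice films none (some num_of_films)

-- ===== PORT B =====
def find_films_with_keywords_alt (film_keywords : List (String × List String)) (num_of_films : Int) : List (String × Int) :=
  let kw_sets := film_keywords.foldl
    (fun (d : PySem.Dict String (PySem.Set String)) kv =>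
      kv.2.foldl
        (fun d film => d.modify film PySem.Set.empty (fun s => PySem.Set.add s kv.1))
        d)
    PySem.Dict.empty
  let ranked := PySem.List.sorted2
    (kw_sets.items.map (fun p => (p.1, PySem.Set.len p.2)))
    (fun x => -x.2) (fun x => x.1)
  PySem.List.slice ranked none (some num_of_films)

-- ===== PRECONDITION & SPEC =====
def Spec_find_films_with_keywords (film_keywords : List (String × List String)) (num_of_films : Int) (out : List (String × Int)) : Prop := out = find_films_with_keywords_alt film_keywords num_of_films
instance (film_keywords : List (String × List String)) (num_of_films : Int) (out : List (String × Int)) : Decidable (Spec_find_films_with_keywords film_keywords num_of_films out) := by unfold Spec_find_films_with_keywords; infer_instance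

-- ===== CLAIM (what is proved, stated in full; the proofs are below) =====
def Claim_equal_find_films_with_keywords : Prop := ∀ (film_keywords : List (String × List String)) (num_of_films : Int), Dom_find_films_with_keywords film_keywords num_of_films → Spec_find_films_with_keywords film_keywords num_of_films (find_films_with_keywords film_keywords num_of_films)

-- ===== LEMMAS AND PROOFS =====

-- A's loop body, as a named step on the (ganre_list, forbidden_list) state.
def pvStepA (fk : List (String × List String)) (st : List Int × List String) (kv : String × List String) : List Int × List String :=
  kv.2.foldl
    (fun (st : List Int × List String) value =>
      if value ∈ st.2 then st
      else (st.1 ++ [PySem.Set.len (find_film_keywords fk value)], st.2 ++ [value]))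
    st

-- B's loop body on the dict state.
def pvStepB (st : PySem.Dict String (PySem.Set String)) (kv : String × List String) : PySem.Dict String (PySem.Set String) :=
  kv.2.foldl
    (fun d film => d.modify film PySem.Set.empty (fun s => PySem.Set.add s kv.1))
    st

-- Invariant of A's loop: the counts list is the map of the full-scan count over the films list.
theorem pvA_inner (fk : List (String × List String)) (kv : String × List String)
    (st : List Int × List String)
    (h : st.1 = st.2.map (fun f => PySem.Set.len (find_film_keywords fk f))) :
    (pvStepA fk st kv).1 = (pvStepA fk st kv).2.map (fun f => PySem.Set.len (find_film_keywords fk f)) := by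
  unfold pvStepA
  induction kv.2 generalizing st with
  | nil => simpa using h
  | cons v vs ih =>
    simp only [List.foldl_cons]
    apply ih
    by_cases hv : v ∈ st.2 <;> simp [hv, h]

theorem pvA_inv (fk l : List (String × List String)) (st : List Int × List String)
    (h : st.1 = st.2.map (fun f => PySem.Set.len (find_film_keywords fk f))) :
    (l.foldl (pvStepA fk) st).1
      = (l.foldl (pvStepA fk) st).2.map (fun f => PySem.Set.len (find_film_keywords fk f)) := by
  induction l generalizing st with
  | nil => simpa using h
  | cons kv l ih => exact ih _ (pvA_inner fk kv st h)

-- A's forbidden list is the ordered-dedup fold of the film names.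
theorem pvA_forbidden_inner (fk : List (String × List String)) (kv : String × List String)
    (st : List Int × List String) :
    (pvStepA fk st kv).2 = PySem.Set.update st.2 kv.2 := by
  unfold pvStepA
  induction kv.2 generalizing st with
  | nil => rfl
  | cons v vs ih =>
    simp only [List.foldl_cons]
    rw [ih]
    by_cases hv : v ∈ st.2 <;>
      simp [PySem.Set.update, hv]

theorem pvA_forbidden (fk l : List (String × List String)) (st : List Int × List String) :
    (l.foldl (pvStepA fk) st).2 = l.foldl (fun ks kv => PySem.Set.update ks kv.2) st.2 := by
  induction l generalizing st with
  | nil => rfl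
  | cons kv l ih => rw [List.foldl_cons, List.foldl_cons, ih, pvA_forbidden_inner]

-- B's keys evolve by the same ordered-dedup fold.
theorem pvB_keys (l : List (String × List String)) (d : PySem.Dict String (PySem.Set String)) :
    (l.foldl pvStepB d).keys = l.foldl (fun ks kv => PySem.Set.update ks kv.2) d.keys := by
  induction l generalizing d with
  | nil => rfl
  | cons kv l ih =>
    rw [List.foldl_cons, List.foldl_cons, ih]
    congr 1
    exact PySem.Dict.keys_foldl_modify kv.2 PySem.Set.empty (fun _ _ s => PySem.Set.add s kv.1) d

theorem pvB_nodup (l : List (String × List String)) (d : PySem.Dict String (PySem.Set String))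
    (h : d.keys.Nodup) : (l.foldl pvStepB d).keys.Nodup := by
  induction l generalizing d with
  | nil => exact h
  | cons kv l ih =>
    exact ih _ (PySem.Dict.nodup_keys_foldl_modify_key kv.2 id PySem.Set.empty
      (fun _ _ s => PySem.Set.add s kv.1) d h)

-- The set stored for a film f equals the full scan find_film_keywords performs for f.
theorem pvB_getD_inner (kv : String × List String) (d : PySem.Dict String (PySem.Set String)) (f : String) :
    (pvStepB d kv).getD f PySem.Set.empty
      = kv.2.foldl
          (fun s value => if value = f then PySem.Set.add s kv.1 else s)
          (d.getD f PySem.Set.empty) := by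
  unfold pvStepB
  induction kv.2 generalizing d with
  | nil => rfl
  | cons v vs ih =>
    simp only [List.foldl_cons]
    rw [ih]
    congr 1
    by_cases hv : v = f
    · subst hv
      rw [PySem.Dict.getD_modify_self, if_pos rfl]
    · rw [if_neg hv, PySem.Dict.getD_modify_of_ne _ _ _ (Ne.symm hv)]

theorem pvB_getD (l : List (String × List String)) (d : PySem.Dict String (PySem.Set String)) (f : String) :
    (l.foldl pvStepB d).getD f PySem.Set.empty
      = l.foldl
          (fun s kv => kv.2.foldl
            (fun s value => if value = f then PySem.Set.add s kv.1 else s) s)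
          (d.getD f PySem.Set.empty) := by
  induction l generalizing d with
  | nil => rfl
  | cons kv l ih => rw [List.foldl_cons, List.foldl_cons, ih, pvB_getD_inner]

theorem pvB_getD_eq_fkw (fk : List (String × List String)) (f : String) :
    (fk.foldl pvStepB PySem.Dict.empty).getD f PySem.Set.empty = find_film_keywords fk f := by
  rw [pvB_getD]; rfl

-- Main: A's zipped list equals B's items mapped to (film, count).
theorem pv_main (fk : List (String × List String)) :
    (fk.foldl (pvStepA fk) ([], [])).2.zip (fk.foldl (pvStepA fk) ([], [])).1
      = (fk.foldl pvStepB PySem.Dict.empty).items.map (fun p => (p.1, PySem.Set.len p.2)) := by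
  have hA := pvA_inv fk fk ([], []) rfl
  have hkeys : (fk.foldl pvStepB PySem.Dict.empty).keys = (fk.foldl (pvStepA fk) ([], [])).2 := by
    rw [pvB_keys, pvA_forbidden]; rfl
  have hnd := pvB_nodup fk PySem.Dict.empty PySem.Dict.nodup_keys_empty
  rw [PySem.Dict.items_eq_map_keys _ hnd PySem.Set.empty]
  simp only [List.map_map]
  rw [hA, ← List.map_prod_left_eq_zip, hkeys]
  apply List.map_congr_left
  intro f _
  simp only [Function.comp_apply, PySem.Set.len, ← pvB_getD_eq_fkw fk f]

-- ===== VERDICT (by name: the statement is the Claim_ definition above) =====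
set_option maxHeartbeats 1000000 in
theorem find_films_with_keywords_spec : Claim_equal_find_films_with_keywords := by
  intro fk n _
  show find_films_with_keywords fk n = find_films_with_keywords_alt fk n
  have h : (fk.foldl
        (fun (st : List Int × List String) kv =>
          kv.2.foldl
            (fun (st : List Int × List String) value =>
              if value ∈ st.2 then st
              else (st.1 ++ [PySem.Set.len (find_film_keywords fk value)], st.2 ++ [value]))
            st)
        ([], [])).2.zip
      (fk.foldl
        (fun (st : List Int × List String) kv =>
          kv.2.foldl
            (fun (st : List Int × List String) value =>
              if value ∈ st.2 then st
              else (st.1 ++ [PySem.Set.len (find_film_keywords fk value)], st.2 ++ [value]))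
            st)
        ([], [])).1
      = (fk.foldl
          (fun (d : PySem.Dict String (PySem.Set String)) kv =>
            kv.2.foldl
              (fun d film => d.modify film PySem.Set.empty (fun s => PySem.Set.add s kv.1))
              d)
          PySem.Dict.empty).items.map (fun p => (p.1, PySem.Set.len p.2)) := pv_main fk
  unfold find_films_with_keywords find_films_with_keywords_alt
  simp only [h]
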